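-- pv_equiv track=rewrite | github.com/learning1234embed/DeepFunctionalNetwork | dfn.py | find_function_num_by_talbe_idx
-- ===== SOURCE A (Python) =====
-- def find_function_num_by_talbe_idx(genotype, idx):
-- 	active_function_sequence = genotype[0]
-- 	input_function_table = genotype[3]
--
-- 	input_function_num = None
-- 	input_function_idx = None
-- 	input_sum = 0
--
-- 	for i in range(len(input_function_table)):
-- 		for j in range(len(input_function_table[i])):
-- 			input_sum += 1
-- 			if input_sum == idx:
-- 				input_function_num = i
-- 				input_function_idx = j
-- 				break
--
-- 		if input_function_num and input_function_idx:
-- 			break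
--
-- 	return input_function_num, input_function_idx
-- ===== SOURCE B (Python) =====
-- def find_function_num_by_talbe_idx(genotype, idx):
--     table = genotype[3]
--     # prefix[i] = number of cells in the first i rows
--     prefix = [0]
--     total = 0
--     for row in table:
--         total += len(row)
--         prefix.append(total)
--     if idx < 1 or total < idx:
--         return None, None
--     # binary search for the first row r with prefix[r+1] >= idx
--     lo, hi = 0, len(table) - 1
--     while lo < hi:
--         mid = (lo + hi) // 2
--         if idx <= prefix[mid + 1]:
--             hi = mid
--         else:
--             lo = mid + 1
--     return lo, idx - prefix[lo] - 1
-- ===== Notes on version B (the rewrite author's own statement) =====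
-- stated objective: alternative
-- what changed: Replaces the cell-by-cell nested scan with a prefix-sum of row lengths plus a binary search for the row, subtracting the prefix for the column.
import Mathlib
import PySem

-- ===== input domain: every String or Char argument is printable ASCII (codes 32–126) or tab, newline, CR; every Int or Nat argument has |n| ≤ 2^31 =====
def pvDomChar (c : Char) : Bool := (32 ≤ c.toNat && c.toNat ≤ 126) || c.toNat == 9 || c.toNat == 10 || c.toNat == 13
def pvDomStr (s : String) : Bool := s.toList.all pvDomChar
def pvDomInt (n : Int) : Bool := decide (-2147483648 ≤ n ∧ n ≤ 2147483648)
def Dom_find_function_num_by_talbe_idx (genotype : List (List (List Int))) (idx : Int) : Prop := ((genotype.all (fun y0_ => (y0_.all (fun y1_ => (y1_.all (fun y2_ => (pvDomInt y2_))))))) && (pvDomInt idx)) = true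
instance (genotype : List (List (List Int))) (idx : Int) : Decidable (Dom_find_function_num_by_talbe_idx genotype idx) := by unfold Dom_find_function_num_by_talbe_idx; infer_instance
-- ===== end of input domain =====

-- B replaces A's cell-by-cell nested scan with a prefix-sum of row lengths plus a
-- binary search for the row (objective: alternative algorithm).

-- ===== PORT A =====
-- Python truthiness of `input_function_num and input_function_idx` (None or 0 are falsy)
def truthyA (o : Option Int) : Bool :=
  match o with
  | some v => v != 0
  | none => false

-- inner `for j in range(len(input_function_table[i]))` loop; `break` = stop recursing
def loopJA (idx : Int) (i : Int) (js : List Int) (st : Int × Option Int × Option Int) :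
    Int × Option Int × Option Int :=
  match js with
  | [] => st
  | j :: rest =>
    let s := st.1 + 1
    if s = idx then (s, some i, some j)
    else loopJA idx i rest (s, st.2)

-- outer `for i in range(len(input_function_table))` loop with the truthiness break test
def loopIA (idx : Int) (rows : List (Int × List Int)) (st : Int × Option Int × Option Int) :
    Int × Option Int × Option Int :=
  match rows with
  | [] => st
  | (i, row) :: rest =>
    let st' := loopJA idx i (PySem.List.pyRange 0 (row.length : Int) 1) st
    if truthyA st'.2.1 && truthyA st'.2.2 then st' else loopIA idx rest st'

def find_function_num_by_talbe_idx (genotype : List (List (List Int))) (idx : Int) :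
    List (Option Int) :=
  -- genotype[0] / genotype[3]: Pre_ guarantees both indices are in range
  let _active_function_sequence := genotype.getD 0 []
  let input_function_table := genotype.getD 3 []
  let st := loopIA idx (PySem.List.enumerate input_function_table 0) (0, none, none)
  [st.2.1, st.2.2]

-- ===== PORT B =====
-- one step of Source B's prefix-building loop: append the running total
def stepB (acc : List Int × Int) (row : List Int) : List Int × Int :=
  let t := acc.2 + (row.length : Int)
  (acc.1 ++ [t], t)

-- Source B's while-loop: first r in [lo,hi] with idx <= prefix[r+1]
def bsearchB (p : List Int) (idx : Int) (lo hi : Nat) : Nat :=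
  if h : lo < hi then
    let mid := (lo + hi) / 2
    if idx ≤ p.getD (mid + 1) 0 then bsearchB p idx lo mid else bsearchB p idx (mid + 1) hi
  else lo
termination_by hi - lo
decreasing_by all_goals omega

def find_function_num_by_talbe_idx_alt (genotype : List (List (List Int))) (idx : Int) :
    List (Option Int) :=
  let table := genotype.getD 3 []   -- genotype[3]: Pre_ guarantees it is in range
  let pt := table.foldl stepB ([0], 0)
  let pfx := pt.1
  let total := pt.2
  if idx < 1 ∨ total < idx then [none, none]
  else
    let lo := bsearchB pfx idx 0 (table.length - 1)
    [some (lo : Int), some (idx - pfx.getD lo 0 - 1)]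

-- ===== PRECONDITION & SPEC =====
-- A indexes genotype[0] and genotype[3]; it raises IndexError iff len(genotype) < 4.
def Pre_find_function_num_by_talbe_idx (genotype : List (List (List Int))) (idx : Int) : Prop :=
  4 ≤ genotype.length

instance (genotype : List (List (List Int))) (idx : Int) :
    Decidable (Pre_find_function_num_by_talbe_idx genotype idx) := by
  unfold Pre_find_function_num_by_talbe_idx; infer_instance

def pvWitness_find_function_num_by_talbe_idx : List (List (List Int)) × Int :=
  ([[], [], [], [[1], [2, 3]]], 2)

def Spec_find_function_num_by_talbe_idx (genotype : List (List (List Int))) (idx : Int) (out : List (Option Int)) : Prop := out = find_function_num_by_talbe_idx_alt genotype idx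
instance (genotype : List (List (List Int))) (idx : Int) (out : List (Option Int)) : Decidable (Spec_find_function_num_by_talbe_idx genotype idx out) := by unfold Spec_find_function_num_by_talbe_idx; infer_instance

-- ===== CLAIM (what is proved, stated in full; the proofs are below) =====
def Claim_equal_find_function_num_by_talbe_idx : Prop := ∀ (genotype : List (List (List Int))) (idx : Int), Dom_find_function_num_by_talbe_idx genotype idx → Pre_find_function_num_by_talbe_idx genotype idx → Spec_find_function_num_by_talbe_idx genotype idx (find_function_num_by_talbe_idx genotype idx)

-- ===== LEMMAS AND PROOFS =====

-- cumulative number of cells in the first k rows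
def cumL : List (List Int) → Nat → Int
  | _, 0 => 0
  | [], _ + 1 => 0
  | r :: rest, k + 1 => (r.length : Int) + cumL rest k

lemma cumL_nonneg (rows : List (List Int)) (k : Nat) : 0 ≤ cumL rows k := by
  induction rows generalizing k with
  | nil => cases k <;> simp [cumL]
  | cons r rest ih =>
    cases k with
    | zero => simp [cumL]
    | succ k => simp only [cumL]; have := ih k; positivity

-- reference result: first row (from index i0, prior cell count s) containing global cell idx
def specFind (idx : Int) : List (List Int) → Int → Int → Option Int × Option Int
  | [], _, _ => (none, none)
  | row :: rest, i0, s =>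
    if idx ≤ s + row.length then (some i0, some (idx - s - 1))
    else specFind idx rest (i0 + 1) (s + row.length)

-- ---- A-side ----

lemma loopJA_ge (idx i : Int) (js : List Int) (s : Int) (nd : Option Int × Option Int)
    (h : idx ≤ s) : loopJA idx i js (s, nd) = (s + js.length, nd) := by
  induction js generalizing s with
  | nil => simp [loopJA]
  | cons j rest ih =>
    have hne : ¬ (s + 1 = idx) := by omega
    simp only [loopJA, if_neg hne]
    rw [ih (s + 1) (by omega)]
    simp only [Prod.mk.injEq, List.length_cons]
    refine ⟨by push_cast; ring, by trivial⟩

lemma loopJA_nohit (idx i : Int) (js : List Int) (s : Int) (nd : Option Int × Option Int)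
    (h : s + js.length < idx) : loopJA idx i js (s, nd) = (s + js.length, nd) := by
  induction js generalizing s with
  | nil => simp [loopJA]
  | cons j rest ih =>
    have hlen : (s + 1) + (rest.length : Int) < idx := by
      simp at h; push_cast at h ⊢; omega
    have hne : ¬ (s + 1 = idx) := by
      have := hlen; have : (0:Int) ≤ rest.length := by positivity
      omega
    simp only [loopJA, if_neg hne]
    rw [ih (s + 1) hlen]
    simp only [Prod.mk.injEq, List.length_cons]
    refine ⟨by push_cast; ring, by trivial⟩

lemma loopJA_hit (idx i : Int) (js : List Int) (s : Int) (nd : Option Int × Option Int)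
    (h1 : s < idx) (h2 : idx ≤ s + js.length) :
    loopJA idx i js (s, nd) = (idx, some i, some (js.getD (idx - s - 1).toNat 0)) := by
  induction js generalizing s with
  | nil => simp at h2; omega
  | cons j rest ih =>
    by_cases he : s + 1 = idx
    · simp only [loopJA, if_pos he, he]
      have : (idx - s - 1).toNat = 0 := by omega
      simp [this]
    · have h1' : s + 1 < idx := by omega
      have h2' : idx ≤ (s + 1) + (rest.length : Int) := by
        simp at h2; push_cast at h2 ⊢; omega
      simp only [loopJA, if_neg he]
      rw [ih (s + 1) h1' h2']
      have hk : (idx - s - 1).toNat = (idx - (s + 1) - 1).toNat + 1 := by omega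
      simp [hk]

lemma pyRange_len (m : Nat) : (PySem.List.pyRange 0 (m : Int) 1).length = m := by
  rw [PySem.List.length_pyRange_one]; omega

lemma pyRange_getD (m k : Nat) (hk : k < m) :
    (PySem.List.pyRange 0 (m : Int) 1).getD k 0 = (k : Int) := by
  rw [PySem.List.pyRange_one]
  have : ((m : Int) - 0).toNat = m := by omega
  rw [this]
  rw [List.getD_eq_getElem?_getD]
  simp [List.getElem?_map, List.getElem?_range, hk]

lemma loopIA_ge (idx : Int) (rows : List (Int × List Int)) (s : Int)
    (nd : Option Int × Option Int) (h : idx ≤ s) : (loopIA idx rows (s, nd)).2 = nd := by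
  induction rows generalizing s with
  | nil => simp [loopIA]
  | cons p rest ih =>
    obtain ⟨i, row⟩ := p
    simp only [loopIA]
    rw [loopJA_ge idx i _ s nd h]
    split
    · rfl
    · exact ih (s + (PySem.List.pyRange 0 (row.length : Int) 1).length)
        (by have : (0:Int) ≤ (PySem.List.pyRange 0 (row.length : Int) 1).length := by positivity
            omega)

lemma loopIA_main (idx : Int) (rows : List (List Int)) : ∀ (k s : Int), s < idx →
    (loopIA idx (PySem.List.enumerate rows k) (s, none, none)).2 = specFind idx rows k s := by
  induction rows with
  | nil => intro k s _; simp [PySem.List.enumerate, loopIA, specFind]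
  | cons row rest ih =>
    intro k s hs
    have hen : PySem.List.enumerate (row :: rest) k = (k, row) :: PySem.List.enumerate rest (k + 1) := by
      simp [PySem.List.enumerate]
    rw [hen]
    simp only [loopIA, specFind]
    by_cases hh : idx ≤ s + row.length
    · rw [if_pos hh]
      rw [loopJA_hit idx k _ s (none, none) hs (by rwa [pyRange_len])]
      have hklt : (idx - s - 1).toNat < row.length := by omega
      rw [pyRange_getD _ _ hklt]
      have hv : ((idx - s - 1).toNat : Int) = idx - s - 1 := by omega
      rw [hv]
      split
      · rfl
      · exact loopIA_ge idx _ idx _ le_rfl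
    · rw [if_neg hh]
      have hlt : s + ((PySem.List.pyRange 0 (row.length : Int) 1).length : Int) < idx := by
        rw [pyRange_len]; omega
      rw [loopJA_nohit idx k _ s (none, none) hlt]
      have hfa : (truthyA (s + ((PySem.List.pyRange 0 (row.length : Int) 1).length : Int), (none : Option Int), (none : Option Int)).2.1 && truthyA (s + ((PySem.List.pyRange 0 (row.length : Int) 1).length : Int), (none : Option Int), (none : Option Int)).2.2) = false := rfl
      rw [hfa]
      simp only [Bool.false_eq_true, if_false]
      rw [pyRange_len]
      exact ih (k + 1) (s + row.length) (by omega)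

-- ---- B-side ----

lemma specFind_none (idx : Int) (rows : List (List Int)) : ∀ (i0 s : Int),
    s + cumL rows rows.length < idx → specFind idx rows i0 s = (none, none) := by
  induction rows with
  | nil => intro i0 s _; simp [specFind]
  | cons row rest ih =>
    intro i0 s h
    simp only [List.length_cons, cumL] at h
    have h0 := cumL_nonneg rest rest.length
    simp only [specFind, if_neg (by omega : ¬ idx ≤ s + (row.length : Int))]
    exact ih (i0 + 1) (s + row.length) (by omega)

lemma specFind_found (idx : Int) (rows : List (List Int)) : ∀ (r : Nat) (i0 s : Int),
    r < rows.length → s + cumL rows r < idx → idx ≤ s + cumL rows (r + 1) →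
    specFind idx rows i0 s = (some (i0 + r), some (idx - s - cumL rows r - 1)) := by
  induction rows with
  | nil => intro r i0 s hr _ _; simp at hr
  | cons row rest ih =>
    intro r i0 s hr hlo hhi
    cases r with
    | zero =>
      simp only [cumL] at hlo hhi ⊢
      have : idx ≤ s + (row.length : Int) := by
        have := hhi; simp [cumL] at this ⊢; omega
      simp only [specFind, if_pos this]
      simp
    | succ r =>
      simp only [cumL] at hlo hhi
      have h0 := cumL_nonneg rest r
      have hnot : ¬ idx ≤ s + (row.length : Int) := by omega
      simp only [specFind, if_neg hnot, cumL]
      rw [ih r (i0 + 1) (s + row.length) (by simpa using hr) (by omega) (by omega)]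
      simp only [Prod.mk.injEq, Option.some.injEq]
      refine ⟨by push_cast; ring, by push_cast; ring⟩

lemma cumL_zero (rows : List (List Int)) : cumL rows 0 = 0 := by
  cases rows <;> simp [cumL]

-- scanB rows t = the prefix entries appended for rows, starting from running total t
def scanB : List (List Int) → Int → List Int
  | [], _ => []
  | r :: rest, t => (t + r.length) :: scanB rest (t + r.length)

lemma foldl_stepB (rows : List (List Int)) : ∀ (p : List Int) (t : Int),
    rows.foldl stepB (p, t) = (p ++ scanB rows t, t + cumL rows rows.length) := by
  induction rows with
  | nil => intro p t; simp [scanB, cumL_zero]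
  | cons row rest ih =>
    intro p t
    simp only [List.foldl_cons]
    have hstep : stepB (p, t) row = (p ++ [t + row.length], t + row.length) := rfl
    rw [hstep, ih]
    simp [scanB, cumL, List.append_assoc]
    ring

lemma prefix_getD (rows : List (List Int)) : ∀ (k : Nat) (t : Int), k ≤ rows.length →
    (t :: scanB rows t).getD k 0 = t + cumL rows k := by
  induction rows with
  | nil =>
    intro k t hk
    simp only [List.length_nil, Nat.le_zero] at hk
    subst hk
    simp [scanB, cumL_zero]
  | cons row rest ih =>
    intro k t hk
    cases k with
    | zero => simp [cumL_zero]
    | succ k =>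
      simp only [scanB, cumL]
      have := ih k (t + row.length) (by simpa using hk)
      simp only [List.getD_cons_succ]
      rw [this]
      ring

lemma bsearchB_bound (p : List Int) (idx : Int) : ∀ (n lo hi : Nat), hi - lo ≤ n →
    lo ≤ hi → p.getD lo 0 < idx → idx ≤ p.getD (hi + 1) 0 →
    lo ≤ bsearchB p idx lo hi ∧ bsearchB p idx lo hi ≤ hi ∧
    p.getD (bsearchB p idx lo hi) 0 < idx ∧ idx ≤ p.getD (bsearchB p idx lo hi + 1) 0 := by
  intro n
  induction n with
  | zero =>
    intro lo hi hn hle hlo hhi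
    have heq : lo = hi := by omega
    subst heq
    rw [bsearchB, dif_neg (lt_irrefl lo)]
    exact ⟨le_rfl, le_rfl, hlo, hhi⟩
  | succ n ih =>
    intro lo hi hn hle hlo hhi
    by_cases h : lo < hi
    · rw [bsearchB, dif_pos h]
      by_cases hc : idx ≤ p.getD ((lo + hi) / 2 + 1) 0
      · simp only [if_pos hc]
        have := ih lo ((lo + hi) / 2) (by omega) (by omega) hlo hc
        exact ⟨this.1, by omega, this.2.2⟩
      · simp only [if_neg hc]
        have := ih ((lo + hi) / 2 + 1) hi (by omega) (by omega) (by omega) hhi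
        exact ⟨by omega, this.2.1, this.2.2⟩
    · have heq : lo = hi := by omega
      subst heq
      rw [bsearchB, dif_neg (lt_irrefl lo)]
      exact ⟨le_rfl, le_rfl, hlo, hhi⟩

-- ===== VERDICT (by name: the statement is the Claim_ definition above) =====
theorem find_function_num_by_talbe_idx_spec : Claim_equal_find_function_num_by_talbe_idx := by
  intro genotype idx _hdom _hpre
  unfold Spec_find_function_num_by_talbe_idx
  simp only [find_function_num_by_talbe_idx, find_function_num_by_talbe_idx_alt]
  set table := genotype.getD 3 [] with htab
  rw [foldl_stepB]
  simp only [List.singleton_append]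
  by_cases hpos : idx < 1
  · rw [if_pos (Or.inl hpos)]
    rw [loopIA_ge idx _ 0 (none, none) (by omega)]
  · have h1 : 1 ≤ idx := by omega
    rw [loopIA_main idx table 0 0 (by omega)]
    by_cases htot : 0 + cumL table table.length < idx
    · rw [if_pos (Or.inr (by simpa using htot))]
      rw [specFind_none idx table 0 0 htot]
    · rw [if_neg (by push_neg; exact ⟨by omega, by simpa using htot⟩)]
      have hne : table.length ≠ 0 := by
        intro h0
        rw [h0, cumL_zero] at htot
        omega
      have hbs := bsearchB_bound (0 :: scanB table 0) idx (table.length - 1) 0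
        (table.length - 1) (by omega) (by omega)
        (by rw [prefix_getD table 0 0 (by omega), cumL_zero]; omega)
        (by rw [show table.length - 1 + 1 = table.length by omega,
                prefix_getD table _ 0 le_rfl]
            omega)
      set r := bsearchB (0 :: scanB table 0) idx 0 (table.length - 1) with hr
      obtain ⟨_, hr2, hr3, hr4⟩ := hbs
      rw [prefix_getD table r 0 (by omega)] at hr3
      rw [prefix_getD table (r + 1) 0 (by omega)] at hr4
      rw [specFind_found idx table r 0 0 (by omega) hr3 hr4]
      rw [prefix_getD table r 0 (by omega)]
      simp
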